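-- pv_equiv track=rewrite | github.com/Rancho2002/DSA | lovebabbar/28_bookAllocateII.py | ayushGivesNinjatest
-- ===== SOURCE A (Python) =====
-- def isPossible(arr,n,mid):
--     count=0
--     day=1
--     for i in arr:
--         if(count+i<=mid):
--             count+=i
--         else:
--             day+=1
--             if(day>n or i>mid):
--                 return False
--             else:
--                 count=i
--     return True
--
-- def ayushGivesNinjatest(n, m, time):
--     # Write your code here.
--     s=0
--     e=sum(time)
--     mid=s+(e-s)//2
--     ans=-1
--     while(s<=e):
--         if(isPossible(time,n,mid)):
--             ans=mid
--             e=mid-1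
--         else:
--             s=mid+1
--         mid=s+(e-s)//2
--     return ans
-- ===== SOURCE B (Python) =====
-- def ayushGivesNinjatest(n, m, time):
--     L = len(time)
--     suf = [0] * (L + 1)               # suf[s] = sum(time[s:])
--     for i in range(L - 1, -1, -1):
--         suf[i] = time[i] + suf[i + 1]
--     k = min(max(n, 1), max(L, 1))     # useful number of parts, clamped to [1, len]
--     dp = suf[:]                        # with 1 part: dp[s] = sum(time[s:])
--     for _ in range(k - 1):             # add one more allowed part per layer
--         dp = [min(max(suf[s] - suf[t], dp[t]) for t in range(s, L + 1))
--               for s in range(L + 1)]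
--     return dp[0]
-- ===== Notes on version B (the rewrite author's own statement) =====
-- stated objective: alternative
-- what changed: Replaces A's binary search on the answer with a greedy feasibility check by a layer-by-layer min-max dynamic program over suffix split points (prefix/suffix sums), computed bottom-up with the part count clamped to [1, len(time)].
-- outside the precondition, e.g. on ayushGivesNinjatest(2, 0, [3, -1]): A returns -1, B returns 2; on ayushGivesNinjatest(3, 0, [7, 8, -1, 2]): A returns 8, B returns 7
import Mathlib
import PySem

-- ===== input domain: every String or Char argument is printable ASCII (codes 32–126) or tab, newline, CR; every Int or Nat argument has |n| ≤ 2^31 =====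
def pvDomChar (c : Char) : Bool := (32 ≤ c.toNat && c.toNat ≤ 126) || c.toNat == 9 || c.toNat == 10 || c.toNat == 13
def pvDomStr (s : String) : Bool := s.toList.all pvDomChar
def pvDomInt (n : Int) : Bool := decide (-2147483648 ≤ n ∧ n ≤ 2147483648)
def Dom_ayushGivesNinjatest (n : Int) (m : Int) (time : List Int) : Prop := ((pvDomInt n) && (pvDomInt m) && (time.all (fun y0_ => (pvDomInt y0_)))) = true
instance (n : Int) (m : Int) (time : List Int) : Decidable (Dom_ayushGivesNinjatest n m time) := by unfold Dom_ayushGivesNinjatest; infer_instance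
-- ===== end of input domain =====

-- B replaces A's binary-search-on-answer (with a greedy feasibility check) by a
-- layer-by-layer min-max dynamic program over suffix split points (objective: alternative).

-- ===== PORT A =====
-- the for-loop of isPossible with its early return, state (count, day)
def isPossibleGo (n mid : Int) : List Int → Int → Int → Bool
  | [], _, _ => true
  | i :: rest, count, day =>
    if count + i ≤ mid then isPossibleGo n mid rest (count + i) day
    else if day + 1 > n ∨ i > mid then false
    else isPossibleGo n mid rest i (day + 1)

def isPossible (arr : List Int) (n mid : Int) : Bool := isPossibleGo n mid arr 0 1

-- the while-loop; Python computes mid before the loop and again at the bottom of each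
-- iteration with the same formula, i.e. mid = s+(e-s)//2 whenever the guard is tested
def bsLoop (n : Int) (time : List Int) (s e ans : Int) : Int :=
  if h : s ≤ e then
    let mid := s + PySem.Int.floordiv (e - s) 2
    if isPossible time n mid then bsLoop n time s (mid - 1) mid
    else bsLoop n time (mid + 1) e ans
  else ans
termination_by (e + 1 - s).toNat
decreasing_by
  · have h2 : PySem.Int.floordiv (e - s) 2 = (e - s) / 2 :=
      PySem.Int.floordiv_eq_ediv_of_pos (by omega)
    simp only [h2]; omega
  · have h2 : PySem.Int.floordiv (e - s) 2 = (e - s) / 2 :=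
      PySem.Int.floordiv_eq_ediv_of_pos (by omega)
    simp only [h2]; omega

def ayushGivesNinjatest (n : Int) (m : Int) (time : List Int) : Int :=
  bsLoop n time 0 time.sum (-1)

-- ===== PORT B =====
-- suf[i] = time[i] + suf[i+1] built from the right, exactly Source B's reverse loop
def sufList : List Int → List Int
  | [] => [0]
  | x :: t => (x + (sufList t).headD 0) :: sufList t

-- Python min over a nonempty sequence
def pyMin : List Int → Int
  | [] => 0
  | x :: r => r.foldl min x

-- one dp layer: dp'[s] = min over t in range(s, L+1) of max(suf[s]-suf[t], dp[t])
def dpStep (suf dp : List Int) (L : Nat) : List Int :=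
  (List.range (L + 1)).map fun s =>
    pyMin ((List.range' s (L + 1 - s)).map fun t =>
      max (suf.getD s 0 - suf.getD t 0) (dp.getD t 0))

-- the 'for _ in range(k-1)' loop
def dpIter (suf : List Int) (L : Nat) : Nat → List Int → List Int
  | 0, dp => dp
  | j + 1, dp => dpIter suf L j (dpStep suf dp L)

def ayushGivesNinjatest_alt (n : Int) (m : Int) (time : List Int) : Int :=
  let L := time.length
  let suf := sufList time
  let k : Int := min (max n 1) (max (L : Int) 1)
  (dpIter suf L (k - 1).toNat suf).getD 0 0

-- ===== PRECONDITION & SPEC =====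
-- Pre_ restricts to the task's natural domain of non-negative times; on lists with a
-- negative element A's answer is an artefact of binary-searching only [0, sum(time)]
-- with a then non-monotone feasibility check (it may return -1 although a partition
-- exists), while B returns the true minimal max-partition sum.
def Pre_ayushGivesNinjatest (n : Int) (m : Int) (time : List Int) : Prop :=
  ∀ x ∈ time, 0 ≤ x
instance (n : Int) (m : Int) (time : List Int) : Decidable (Pre_ayushGivesNinjatest n m time) := by unfold Pre_ayushGivesNinjatest; infer_instance

def pvWitness_ayushGivesNinjatest : Int × Int × List Int := (3, 0, [10, 20, 30, 40])

def Spec_ayushGivesNinjatest (n : Int) (m : Int) (time : List Int) (out : Int) : Prop := out = ayushGivesNinjatest_alt n m time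
instance (n : Int) (m : Int) (time : List Int) (out : Int) : Decidable (Spec_ayushGivesNinjatest n m time out) := by unfold Spec_ayushGivesNinjatest; infer_instance

-- ===== CLAIM (what is proved, stated in full; the proofs are below) =====
def Claim_equal_ayushGivesNinjatest : Prop := ∀ (n : Int) (m : Int) (time : List Int), Dom_ayushGivesNinjatest n m time → Pre_ayushGivesNinjatest n m time → Spec_ayushGivesNinjatest n m time (ayushGivesNinjatest n m time)

-- ===== LEMMAS AND PROOFS =====

-- Feasibility: FeasF r xs c m ↔ xs splits into a first (current) part of sum ≤ c
-- followed by at most r further parts of sum ≤ m each.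
def FeasF : Nat → List Int → Int → Int → Prop
  | 0, xs, c, _ => xs.sum ≤ c
  | r + 1, xs, c, m => ∃ i, i ≤ xs.length ∧ (xs.take i).sum ≤ c ∧ FeasF r (xs.drop i) m m

lemma feasF_nil {c m : Int} (hc : 0 ≤ c) (hm : 0 ≤ m) : ∀ r, FeasF r ([] : List Int) c m := by
  intro r; cases r with
  | zero => simpa [FeasF] using hc
  | succ r => exact ⟨0, by simp, by simpa using hc, by
      induction r with
      | zero => simpa [FeasF] using hm
      | succ r ih => exact ⟨0, by simp, by simpa using hm, by simpa using ih⟩⟩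

lemma feasF_mono_c {r : Nat} {xs : List Int} {c c' m : Int} (h : c ≤ c')
    (hf : FeasF r xs c m) : FeasF r xs c' m := by
  cases r with
  | zero => exact le_trans hf h
  | succ r => obtain ⟨i, hi, hs, hrest⟩ := hf; exact ⟨i, hi, le_trans hs h, hrest⟩

lemma feasF_mono_r {xs : List Int} {c m : Int} (hm : 0 ≤ m) :
    ∀ r, FeasF r xs c m → FeasF (r + 1) xs c m := by
  intro r
  induction r generalizing xs c with
  | zero =>
    intro h
    exact ⟨xs.length, le_rfl, by simpa using h, by simpa using feasF_nil hm hm 0⟩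
  | succ r ih =>
    rintro ⟨i, hi, hs, hrest⟩
    exact ⟨i, hi, hs, ih hrest⟩

lemma feasF_mono_r_le {xs : List Int} {c m : Int} (hm : 0 ≤ m) {r r' : Nat} (h : r ≤ r') :
    FeasF r xs c m → FeasF r' xs c m := by
  induction h with
  | refl => exact id
  | step _ ih => exact fun hf => feasF_mono_r hm _ (ih hf)

lemma feasF_elem_le {m : Int} : ∀ (r : Nat) (xs : List Int) (c : Int), (∀ x ∈ xs, 0 ≤ x) →
    c ≤ m → FeasF r xs c m → ∀ x ∈ xs, x ≤ m := by
  intro r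
  induction r with
  | zero =>
    intro xs c hnn hcm hf x hx
    have : x ≤ xs.sum := List.single_le_sum hnn x hx
    exact le_trans this (le_trans hf hcm)
  | succ r ih =>
    intro xs c hnn hcm hf x hx
    obtain ⟨i, hi, hs, hrest⟩ := hf
    rcases (List.mem_append.mp (by simpa [List.take_append_drop] using hx) : x ∈ xs.take i ∨ x ∈ xs.drop i) with h | h
    · have : x ≤ (xs.take i).sum :=
        List.single_le_sum (fun y hy => hnn y (List.mem_of_mem_take hy)) x h
      exact le_trans this (le_trans hs hcm)
    · exact ih (xs.drop i) m (fun y hy => hnn y (List.mem_of_mem_drop hy)) le_rfl hrest x h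

-- exchange: if x fits into the current part, it may be put there
lemma feasF_exchange {x m : Int} (hx0 : 0 ≤ x) : ∀ (r : Nat) (xs : List Int) (c : Int),
    x ≤ c → c ≤ m → FeasF r (x :: xs) c m → FeasF r xs (c - x) m := by
  intro r
  induction r with
  | zero => intro xs c hxc hcm hf; simp only [FeasF, List.sum_cons] at hf ⊢; omega
  | succ r ih =>
    intro xs c hxc hcm hf
    obtain ⟨i, hi, hs, hrest⟩ := hf
    cases i with
    | zero =>
      simp only [List.take_zero, List.drop_zero] at hs hrest
      have h1 : FeasF r xs (m - x) m := ih xs m (le_trans hxc hcm) le_rfl hrest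
      have h2 : FeasF r xs m m := feasF_mono_c (by omega) h1
      exact ⟨0, by simp, by simpa using sub_nonneg.mpr hxc, by simpa using h2⟩
    | succ i =>
      refine ⟨i, by simpa using Nat.succ_le_succ_iff.mp hi, ?_, by simpa using hrest⟩
      simp only [List.take_succ_cons, List.sum_cons] at hs
      omega

lemma feasF_prepend {x m : Int} : ∀ (r : Nat) (xs : List Int) (c : Int),
    FeasF r xs (c - x) m → FeasF r (x :: xs) c m := by
  intro r
  cases r with
  | zero => intro xs c hf; simp only [FeasF, List.sum_cons] at hf ⊢; omega
  | succ r =>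
    rintro xs c ⟨i, hi, hs, hrest⟩
    exact ⟨i + 1, by simpa using hi, by simp [List.sum_cons]; omega, by simpa using hrest⟩

-- with enough parts, singletons: r+1 parts suffice for a list of length ≤ r+1
lemma feasF_singletons {m : Int} (hm : 0 ≤ m) : ∀ (xs : List Int) (r : Nat),
    xs.length ≤ r + 1 → (∀ x ∈ xs, x ≤ m) → FeasF r xs m m := by
  intro xs
  induction xs with
  | nil => intro r _ _; exact feasF_nil hm hm r
  | cons x t ih =>
    intro r hlen hle
    cases r with
    | zero =>
      have : t = [] := List.eq_nil_of_length_eq_zero (by simpa using hlen)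
      subst this
      simpa [FeasF] using hle x (by simp)
    | succ r =>
      refine ⟨1, by simp, by simpa using hle x (by simp), ?_⟩
      simpa using ih r (by simpa using hlen) (fun y hy => hle y (List.mem_cons_of_mem _ hy))

-- ========== the greedy check characterises FeasF ==========

lemma greedyGo_iff (n mid : Int) (hmid : 0 ≤ mid) : ∀ (xs : List Int) (count day : Int),
    (∀ x ∈ xs, 0 ≤ x) → 0 ≤ count → count ≤ mid →
    (isPossibleGo n mid xs count day = true ↔ FeasF (n - day).toNat xs (mid - count) mid) := by
  intro xs
  induction xs with
  | nil =>
    intro count day _ h0 h1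
    simp only [isPossibleGo, true_iff]
    exact feasF_nil (by omega) hmid _
  | cons x t ih =>
    intro count day hnn h0 h1
    have hx0 : 0 ≤ x := hnn x (by simp)
    have hnt : ∀ y ∈ t, 0 ≤ y := fun y hy => hnn y (List.mem_cons_of_mem _ hy)
    by_cases hfit : count + x ≤ mid
    · -- x goes into the current part
      have ihh := ih (count + x) day hnt (by omega) hfit
      rw [show isPossibleGo n mid (x :: t) count day = isPossibleGo n mid t (count + x) day from by
        simp [isPossibleGo, hfit]]
      rw [ihh]
      constructor
      · intro hf
        have : FeasF (n - day).toNat t ((mid - count) - x) mid := by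
          have : mid - (count + x) = (mid - count) - x := by ring
          rwa [this] at hf
        exact feasF_prepend _ t _ this
      · intro hf
        have := feasF_exchange hx0 _ t (mid - count) (by omega) (by omega) hf
        have h2 : (mid - count) - x = mid - (count + x) := by ring
        rwa [h2] at this
    · -- x opens a new day
      have hgo : isPossibleGo n mid (x :: t) count day =
          (if day + 1 > n ∨ x > mid then false else isPossibleGo n mid t x (day + 1)) := by
        simp [isPossibleGo, hfit]
      by_cases hday : day + 1 > n
      · -- no day left: r = 0
        have hr : (n - day).toNat = 0 := by omega
        rw [hgo, if_pos (Or.inl hday), hr]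
        have hts : 0 ≤ t.sum := List.sum_nonneg hnt
        simp only [FeasF, List.sum_cons, Bool.false_eq_true, false_iff, not_le]
        omega
      · by_cases hbig : x > mid
        · -- x fits nowhere
          rw [hgo, if_pos (Or.inr hbig)]
          simp only [Bool.false_eq_true, false_iff]
          intro hf
          have := feasF_elem_le _ (x :: t) _ hnn (by omega) hf x (by simp)
          omega
        · -- new day with x in it
          have hr : (n - day).toNat = ((n - (day + 1)).toNat) + 1 := by omega
          rw [hgo, if_neg (by omega), hr]
          have ihh := ih x (day + 1) hnt hx0 (by omega)
          rw [ihh]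
          constructor
          · intro hf
            refine ⟨0, by simp, by simpa using (by omega : (0:Int) ≤ mid - count), ?_⟩
            simpa using feasF_prepend _ t mid (by simpa using hf)
          · rintro ⟨i, hi, hs, hrest⟩
            cases i with
            | zero =>
              simp only [List.drop_zero] at hrest
              have := feasF_exchange hx0 _ t mid (by omega) le_rfl hrest
              exact this
            | succ i =>
              exfalso
              simp only [List.take_succ_cons, List.sum_cons] at hs
              have : 0 ≤ (t.take i).sum := List.sum_nonneg (fun y hy => hnt y (List.mem_of_mem_take hy))
              omega

-- ========== the dp layers compute the least feasible bound ==========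

def segS (time : List Int) (s t : Nat) : Int := (time.drop s).sum - (time.drop t).sum

def dpF (time : List Int) : Nat → Nat → Int
  | 0, s => (time.drop s).sum
  | r + 1, s => pyMin ((List.range' s (time.length + 1 - s)).map fun t =>
      max (segS time s t) (dpF time r t))

lemma foldl_min_le_iff : ∀ (r : List Int) (x a : Int),
    (r.foldl min x ≤ a ↔ x ≤ a ∨ ∃ y ∈ r, y ≤ a) := by
  intro r
  induction r with
  | nil => intro x a; simp
  | cons y t ih =>
    intro x a
    simp only [List.foldl_cons]
    rw [ih (min x y) a, min_le_iff]
    constructor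
    · rintro (( h | h ) | ⟨z, hz, hza⟩)
      · exact Or.inl h
      · exact Or.inr ⟨y, by simp, h⟩
      · exact Or.inr ⟨z, by simp [hz], hza⟩
    · rintro (h | ⟨z, hz, hza⟩)
      · exact Or.inl (Or.inl h)
      · rcases List.mem_cons.mp hz with rfl | hz
        · exact Or.inl (Or.inr hza)
        · exact Or.inr ⟨z, hz, hza⟩

lemma pyMin_le_iff {l : List Int} {a : Int} (hne : l ≠ []) :
    pyMin l ≤ a ↔ ∃ x ∈ l, x ≤ a := by
  obtain ⟨x, r, rfl⟩ := List.exists_cons_of_ne_nil hne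
  show r.foldl min x ≤ a ↔ _
  rw [foldl_min_le_iff]
  constructor
  · rintro (h | ⟨y, hy, hya⟩)
    · exact ⟨x, by simp, h⟩
    · exact ⟨y, by simp [hy], hya⟩
  · rintro ⟨y, hy, hya⟩
    rcases List.mem_cons.mp hy with rfl | hy
    · exact Or.inl hya
    · exact Or.inr ⟨y, hy, hya⟩

lemma le_foldl_min : ∀ (r : List Int) (x a : Int), a ≤ x → (∀ y ∈ r, a ≤ y) →
    a ≤ r.foldl min x := by
  intro r
  induction r with
  | nil => intro x a h _; simpa using h
  | cons y t ih =>
    intro x a hx h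
    simp only [List.foldl_cons]
    exact ih (min x y) a (le_min hx (h y (by simp))) (fun z hz => h z (by simp [hz]))

lemma le_pyMin {l : List Int} {a : Int} (hne : l ≠ []) (h : ∀ x ∈ l, a ≤ x) :
    a ≤ pyMin l := by
  obtain ⟨x, r, rfl⟩ := List.exists_cons_of_ne_nil hne
  exact le_foldl_min r x a (h x (by simp)) (fun y hy => h y (by simp [hy]))

lemma dpF_nonneg {time : List Int} (hnn : ∀ x ∈ time, 0 ≤ x) :
    ∀ (r : Nat) (s : Nat), 0 ≤ dpF time r s := by
  intro r
  induction r with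
  | zero =>
    intro s
    exact List.sum_nonneg (fun y hy => hnn y (List.mem_of_mem_drop hy))
  | succ r ih =>
    intro s
    by_cases hsL : s ≤ time.length
    · apply le_pyMin
      · simp only [ne_eq, List.map_eq_nil_iff, List.range'_eq_nil_iff]
        omega
      · intro x hx
        simp only [List.mem_map] at hx
        obtain ⟨t, _, rfl⟩ := hx
        exact le_trans (ih t) (le_max_right _ _)
    · show 0 ≤ pyMin _
      rw [show time.length + 1 - s = 0 from by omega]
      simp [pyMin]

lemma sum_take_drop (time : List Int) (s i : Nat) :
    ((time.drop s).take i).sum = (time.drop s).sum - (time.drop (s + i)).sum := by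
  have h : (time.drop s).take i ++ (time.drop s).drop i = time.drop s := List.take_append_drop _ _
  have h2 : (time.drop s).drop i = time.drop (s + i) := by rw [List.drop_drop]
  have := congrArg List.sum h
  rw [List.sum_append, h2] at this
  omega

lemma dpF_le_iff {time : List Int} :
    ∀ (r : Nat) (s : Nat), s ≤ time.length → ∀ (a : Int), 0 ≤ a →
    (dpF time r s ≤ a ↔ FeasF r (time.drop s) a a) := by
  intro r
  induction r with
  | zero => intro s _ a _; simp [dpF, FeasF]
  | succ r ih =>
    intro s hs a ha
    have hne : ((List.range' s (time.length + 1 - s)).map fun t =>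
        max (segS time s t) (dpF time r t)) ≠ [] := by
      simp [List.range'_eq_nil_iff]; omega
    rw [show dpF time (r + 1) s = pyMin ((List.range' s (time.length + 1 - s)).map fun t =>
        max (segS time s t) (dpF time r t)) from rfl]
    rw [pyMin_le_iff hne]
    constructor
    · rintro ⟨x, hx, hxa⟩
      simp only [List.mem_map, List.mem_range'_1] at hx
      obtain ⟨t, ⟨hts, htL⟩, rfl⟩ := hx
      have htL' : t ≤ time.length := by omega
      have h1 : segS time s t ≤ a := le_trans (le_max_left _ _) hxa
      have h2 : dpF time r t ≤ a := le_trans (le_max_right _ _) hxa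
      refine ⟨t - s, by simp [List.length_drop]; omega, ?_, ?_⟩
      · rw [sum_take_drop, show s + (t - s) = t from by omega]
        exact h1
      · rw [List.drop_drop]
        rw [show s + (t - s) = t from by omega]
        exact (ih t htL' a ha).mp h2
    · rintro ⟨i, hi, hsum, hrest⟩
      have hiL : s + i ≤ time.length := by
        simp [List.length_drop] at hi; omega
      refine ⟨max (segS time s (s + i)) (dpF time r (s + i)), ?_, ?_⟩
      · simp only [List.mem_map, List.mem_range'_1]
        exact ⟨s + i, ⟨by omega, by omega⟩, rfl⟩
      · have e1 := sum_take_drop time s i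
        have h1 : segS time s (s + i) ≤ a := by
          simp only [segS]
          omega
        have h2 : dpF time r (s + i) ≤ a := by
          apply (ih (s + i) hiL a ha).mpr
          rwa [List.drop_drop] at hrest
        omega

-- ========== bridging the port of B to dpF ==========

lemma sufList_eq_map (time : List Int) :
    sufList time = (List.range (time.length + 1)).map fun s => (time.drop s).sum := by
  induction time with
  | nil => simp [sufList]
  | cons x t ih =>
    show (x + (sufList t).headD 0) :: sufList t = _
    rw [show (x :: t).length + 1 = (t.length + 1) + 1 from rfl, List.range_succ_eq_map,
        List.map_cons, List.map_map]
    have hhead : (sufList t).headD 0 = t.sum := by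
      rw [ih, List.range_succ_eq_map, List.map_cons]
      simp
    rw [hhead, ih]
    refine congrArg₂ List.cons (by simp) ?_
    apply List.map_congr_left
    intro s _
    simp

lemma getD_map_range (f : Nat → Int) {N i : Nat} (h : i < N) :
    ((List.range N).map f).getD i 0 = f i := by
  rw [List.getD_eq_getElem?_getD, List.getElem?_map, List.getElem?_range h]
  rfl

lemma dpStep_eq (time : List Int) (j : Nat) :
    dpStep (sufList time) ((List.range (time.length + 1)).map (dpF time j)) time.length
      = (List.range (time.length + 1)).map (dpF time (j + 1)) := by
  unfold dpStep
  apply List.map_congr_left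
  intro s hs
  have hsL : s < time.length + 1 := List.mem_range.mp hs
  rw [show dpF time (j + 1) s = pyMin ((List.range' s (time.length + 1 - s)).map fun t =>
      max (segS time s t) (dpF time j t)) from rfl]
  congr 1
  apply List.map_congr_left
  intro t ht
  have htL : t < time.length + 1 := by
    have := List.mem_range'_1.mp ht; omega
  rw [sufList_eq_map, getD_map_range _ hsL, getD_map_range _ htL,
      getD_map_range _ htL]
  rfl

lemma dpIter_eq (time : List Int) : ∀ (j a : Nat),
    dpIter (sufList time) time.length j ((List.range (time.length + 1)).map (dpF time a))
      = (List.range (time.length + 1)).map (dpF time (a + j)) := by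
  intro j
  induction j with
  | zero => intro a; rfl
  | succ j ih =>
    intro a
    show dpIter _ _ j (dpStep _ _ _) = _
    rw [dpStep_eq, ih (a + 1), show a + 1 + j = a + (j + 1) from by omega]

lemma alt_eq_dpF (n m : Int) (time : List Int) :
    ayushGivesNinjatest_alt n m time
      = dpF time ((min (max n 1) (max (time.length : Int) 1)) - 1).toNat 0 := by
  show (dpIter (sufList time) time.length
      ((min (max n 1) (max (time.length : Int) 1)) - 1).toNat (sufList time)).getD 0 0 = _
  have h0 : sufList time = (List.range (time.length + 1)).map (dpF time 0) := by
    rw [sufList_eq_map]; rfl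
  have h1 := congrArg
    (dpIter (sufList time) time.length ((min (max n 1) (max (time.length : Int) 1)) - 1).toNat) h0
  rw [h1, dpIter_eq time _ 0, getD_map_range _ (by omega : (0:Nat) < time.length + 1)]
  norm_num

-- ========== the characterisation of isPossible ==========

lemma isPossible_iff_V {n : Int} {time : List Int} (hnn : ∀ x ∈ time, 0 ≤ x)
    {mid : Int} (hmid : 0 ≤ mid) :
    isPossible time n mid = true ↔
      dpF time ((min (max n 1) (max (time.length : Int) 1)) - 1).toNat 0 ≤ mid := by
  set rB : Nat := ((min (max n 1) (max (time.length : Int) 1)) - 1).toNat with hrB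
  have h1 : isPossible time n mid = true ↔ FeasF (n - 1).toNat time mid mid := by
    have := greedyGo_iff n mid hmid time 0 1 hnn le_rfl hmid
    simpa [isPossible] using this
  have h2 : FeasF (n - 1).toNat time mid mid ↔ FeasF rB time mid mid := by
    rcases List.eq_nil_or_concat time with rfl | _
    · constructor <;> intro _ <;> exact feasF_nil hmid hmid _
    · -- nonempty: rB = min (n-1).toNat (length - 1)
      have hL : 1 ≤ time.length := by
        cases time with
        | nil => simp_all
        | cons x t => simp
      have hrBval : rB = min (n - 1).toNat (time.length - 1) := by
        rw [hrB]
        omega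
      constructor
      · intro hf
        rcases Nat.le_total (n - 1).toNat (time.length - 1) with hc | hc
        · rwa [hrBval, Nat.min_eq_left hc]
        · have hall : ∀ x ∈ time, x ≤ mid := feasF_elem_le _ time mid hnn le_rfl hf
          rw [hrBval, Nat.min_eq_right hc]
          exact feasF_singletons hmid time _ (by omega) hall
      · intro hf
        exact feasF_mono_r_le hmid (by omega) hf
  rw [h1, h2]
  have h3 := dpF_le_iff (time := time) rB 0 (by omega) mid hmid
  rw [List.drop_zero] at h3
  exact h3.symm

-- ========== binary search correctness ==========

lemma bsLoop_eq_V {n : Int} {time : List Int} {V : Int}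
    (hP : ∀ mid : Int, 0 ≤ mid → (isPossible time n mid = true ↔ V ≤ mid)) :
    ∀ (N : Nat) (s e ans : Int), (e + 1 - s).toNat ≤ N → 0 ≤ s → s ≤ V →
    (V ≤ e ∨ ans = V) → bsLoop n time s e ans = V := by
  intro N
  induction N with
  | zero =>
    intro s e ans hN h0 hsV hor
    rw [bsLoop]
    have hse : ¬ (s ≤ e) := by omega
    rw [dif_neg hse]
    rcases hor with h | h
    · omega
    · exact h
  | succ N ih =>
    intro s e ans hN h0 hsV hor
    rw [bsLoop]
    by_cases hse : s ≤ e
    · rw [dif_pos hse]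
      have h2 : PySem.Int.floordiv (e - s) 2 = (e - s) / 2 :=
        PySem.Int.floordiv_eq_ediv_of_pos (by omega)
      set mid := s + PySem.Int.floordiv (e - s) 2 with hmiddef
      have hmidb : s ≤ mid ∧ mid ≤ e := by rw [hmiddef, h2]; omega
      have hmid0 : 0 ≤ mid := by omega
      by_cases hposs : isPossible time n mid = true
      · have hVmid : V ≤ mid := (hP mid hmid0).mp hposs
        rw [if_pos hposs]
        apply ih s (mid - 1) mid (by rw [hmiddef, h2] at *; omega) h0 hsV
        omega
      · have hVmid : ¬ (V ≤ mid) := fun hc => hposs ((hP mid hmid0).mpr hc)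
        rw [if_neg hposs]
        apply ih (mid + 1) e ans (by rw [hmiddef, h2] at *; omega) (by omega) (by omega)
        exact hor
    · rw [dif_neg hse]
      rcases hor with h | h
      · omega
      · exact h

-- ===== VERDICT (by name: the statement is the Claim_ definition above) =====
theorem ayushGivesNinjatest_spec : Claim_equal_ayushGivesNinjatest := by
  intro n m time _ hpre
  unfold Spec_ayushGivesNinjatest
  rw [alt_eq_dpF]
  set V := dpF time ((min (max n 1) (max (time.length : Int) 1)) - 1).toNat 0 with hV
  have hP : ∀ mid : Int, 0 ≤ mid → (isPossible time n mid = true ↔ V ≤ mid) := by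
    intro mid hmid
    rw [hV]
    exact isPossible_iff_V hpre hmid
  have hV0 : 0 ≤ V := dpF_nonneg hpre _ _
  have hsum0 : 0 ≤ time.sum := List.sum_nonneg hpre
  have hVsum : V ≤ time.sum := by
    have := (hP time.sum hsum0)
    -- feasibility at mid = sum: one part suffices
    have hposs : isPossible time n time.sum = true := by
      rw [show isPossible time n time.sum = isPossibleGo n time.sum time 0 1 from rfl]
      rw [greedyGo_iff n time.sum hsum0 time 0 1 hpre le_rfl hsum0]
      apply feasF_mono_r_le hsum0 (Nat.zero_le _)
      show FeasF 0 time (time.sum - 0) time.sum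
      simp [FeasF]
    exact this.mp hposs
  unfold ayushGivesNinjatest
  exact bsLoop_eq_V hP (time.sum + 1 - 0).toNat 0 time.sum (-1) le_rfl le_rfl hV0 (Or.inl hVsum)
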